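-- pv_equiv track=rewrite | github.com/bryceroche/mycelium | plan/lambda_c1_extract_v3.py | find_major_boundaries
-- ===== SOURCE A (Python) =====
-- def find_major_boundaries(
--     heartbeat_transitions: list[int],
--     alarm_events: list[int],
--     window: int = 2,
-- ) -> list[int]:
--     """
--     Find major boundaries where heartbeat and alarm co-transition.
--     """
--     major = []
--     alarm_set = set(alarm_events)
--
--     for t in heartbeat_transitions:
--         # Check if alarm fires within ±window steps
--         for offset in range(-window, window + 1):
--             if (t + offset) in alarm_set:
--                 major.append(t)
--                 break
--
--     return major
-- ===== SOURCE B (Python) =====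
-- def _bisect_left(a, x):
--     # hand-written bisect_left (A imports no modules, so no bisect import)
--     lo, hi = 0, len(a)
--     while lo < hi:
--         mid = (lo + hi) // 2
--         if a[mid] < x:
--             lo = mid + 1
--         else:
--             hi = mid
--     return lo
--
--
-- def find_major_boundaries(
--     heartbeat_transitions: list[int],
--     alarm_events: list[int],
--     window: int = 2,
-- ) -> list[int]:
--     srt = sorted(alarm_events)
--
--     def has_alarm_near(t: int) -> bool:
--         i = _bisect_left(srt, t - window)
--         return i < len(srt) and srt[i] <= t + window
--
--     return [t for t in heartbeat_transitions if has_alarm_near(t)]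
-- ===== Notes on version B (the rewrite author's own statement) =====
-- stated objective: faster
-- what changed: Instead of probing the alarm set at every offset in [-window, window] for each heartbeat (O(H*W)), B sorts the alarms once and binary-searches (bisect_left) for the first alarm >= t-window, testing whether it is <= t+window.
import Mathlib
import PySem

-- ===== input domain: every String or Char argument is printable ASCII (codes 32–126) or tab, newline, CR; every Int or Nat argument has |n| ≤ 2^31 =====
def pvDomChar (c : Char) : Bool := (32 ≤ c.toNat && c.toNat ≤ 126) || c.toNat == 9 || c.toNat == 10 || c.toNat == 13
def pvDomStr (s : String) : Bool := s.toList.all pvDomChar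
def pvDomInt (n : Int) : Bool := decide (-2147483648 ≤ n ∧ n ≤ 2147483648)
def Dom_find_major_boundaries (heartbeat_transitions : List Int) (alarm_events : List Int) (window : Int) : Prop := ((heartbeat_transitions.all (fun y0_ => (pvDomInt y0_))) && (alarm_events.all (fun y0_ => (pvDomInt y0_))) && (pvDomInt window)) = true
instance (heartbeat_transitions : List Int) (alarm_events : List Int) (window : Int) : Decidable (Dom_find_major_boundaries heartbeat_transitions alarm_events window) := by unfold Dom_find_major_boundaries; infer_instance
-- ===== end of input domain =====

-- B replaces A's per-heartbeat scan of every offset in [-window, window] by one sort of the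
-- alarms plus a bisect_left per heartbeat (objective: faster, asymptotic).

-- ===== PORT A =====
-- 'for offset in range(-window, window+1): if (t+offset) in alarm_set: major.append(t); break'
-- appends t exactly once iff some offset matches: ported as List.any over the same range.
def find_major_boundaries (heartbeat_transitions : List Int) (alarm_events : List Int) (window : Int) : List Int :=
  let alarm_set : PySem.Set Int := PySem.Set.ofList alarm_events
  heartbeat_transitions.foldl
    (fun major t =>
      if (PySem.List.pyRange (-window) (window + 1) 1).any
           (fun offset => PySem.Set.contains alarm_set (t + offset))
      then major ++ [t] else major)
    []

-- ===== PORT B =====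
-- Source B's hand-written _bisect_left is exactly the standard bisect_left loop;
-- PySem.List.bisectLeft is that same lo/hi binary-search loop.
def find_major_boundaries_alt (heartbeat_transitions : List Int) (alarm_events : List Int) (window : Int) : List Int :=
  let srt := PySem.List.sorted alarm_events (fun x => x) false
  heartbeat_transitions.filter (fun t =>
    let i := PySem.List.bisectLeft srt (t - window)
    decide (i < srt.length ∧ srt.getD i 0 ≤ t + window))

-- ===== PRECONDITION & SPEC =====
def Spec_find_major_boundaries (heartbeat_transitions : List Int) (alarm_events : List Int) (window : Int) (out : List Int) : Prop := out = find_major_boundaries_alt heartbeat_transitions alarm_events window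
instance (heartbeat_transitions : List Int) (alarm_events : List Int) (window : Int) (out : List Int) : Decidable (Spec_find_major_boundaries heartbeat_transitions alarm_events window out) := by unfold Spec_find_major_boundaries; infer_instance

-- ===== CLAIM (what is proved, stated in full; the proofs are below) =====
def Claim_equal_find_major_boundaries : Prop := ∀ (heartbeat_transitions : List Int) (alarm_events : List Int) (window : Int), Dom_find_major_boundaries heartbeat_transitions alarm_events window → Spec_find_major_boundaries heartbeat_transitions alarm_events window (find_major_boundaries heartbeat_transitions alarm_events window)

-- ===== LEMMAS AND PROOFS =====

-- A's per-heartbeat test is "some alarm lies in [t-window, t+window]".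
theorem predA_iff (alarm_events : List Int) (window t : Int) :
    ((PySem.List.pyRange (-window) (window + 1) 1).any
       (fun offset => PySem.Set.contains (PySem.Set.ofList alarm_events) (t + offset)) = true)
    ↔ ∃ a ∈ alarm_events, t - window ≤ a ∧ a ≤ t + window := by
  simp only [List.any_eq_true, PySem.Set.contains_iff, PySem.Set.mem_ofList,
    PySem.List.mem_pyRange_one]
  constructor
  · rintro ⟨off, ⟨h1, h2⟩, hmem⟩
    exact ⟨t + off, hmem, by omega⟩
  · rintro ⟨a, hmem, h1, h2⟩
    exact ⟨a - t, ⟨by omega, by omega⟩, by simpa using hmem⟩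

-- B's per-heartbeat test is the same predicate, via bisect_left on the sorted alarms.
theorem predB_iff (alarm_events : List Int) (window t : Int) :
    (let srt := PySem.List.sorted alarm_events (fun x => x) false
     let i := PySem.List.bisectLeft srt (t - window)
     i < srt.length ∧ srt.getD i 0 ≤ t + window)
    ↔ ∃ a ∈ alarm_events, t - window ≤ a ∧ a ≤ t + window := by
  set srt := PySem.List.sorted alarm_events (fun x => x) false with hsrt
  have hpair : List.Pairwise (fun a b => a ≤ b) srt := PySem.List.sorted_pairwise alarm_events (fun x => x)
  have hperm : srt.Perm alarm_events := PySem.List.sorted_perm alarm_events (fun x => x) false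
  obtain ⟨hle, hlt, hge⟩ := PySem.List.bisectLeft_spec srt (t - window) hpair
  set i := PySem.List.bisectLeft srt (t - window) with hi
  constructor
  · rintro ⟨hil, hub⟩
    refine ⟨srt.getD i 0, hperm.mem_iff.mp ?_, ?_, hub⟩
    · rw [List.getD_eq_getElem srt 0 hil]; exact List.getElem_mem hil
    · rw [List.getD_eq_getElem srt 0 hil]; exact hge i hil le_rfl
  · rintro ⟨a, hmem, h1, h2⟩
    obtain ⟨j, hj, hja⟩ := List.mem_iff_getElem.mp (hperm.mem_iff.mpr hmem)
    have hij : i ≤ j := by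
      by_contra h
      have := hlt j hj (by omega)
      omega
    have hil : i < srt.length := lt_of_le_of_lt hij hj
    refine ⟨hil, ?_⟩
    rw [List.getD_eq_getElem srt 0 hil]
    have hmono : srt[i] ≤ srt[j] := by
      rcases eq_or_lt_of_le hij with h | h
      · simp [h]
      · exact List.pairwise_iff_getElem.mp hpair i j hil hj h
    omega

theorem find_major_boundaries_spec : Claim_equal_find_major_boundaries := by
  intro hb al w _
  unfold Spec_find_major_boundaries find_major_boundaries find_major_boundaries_alt
  rw [PySem.List.foldl_append_if_eq_filter]
  simp only [List.nil_append]
  apply List.filter_congr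
  intro t _
  apply Bool.eq_iff_iff.mpr
  simp only [decide_eq_true_eq]
  rw [predA_iff]
  exact (predB_iff al w t).symm
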